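-- pv_equiv track=rewrite | github.com/Akkadian-delphi/sonicus | backend/app/routers/authentik_auth.py | determine_role_from_groups
-- ===== SOURCE A (Python) =====
-- def determine_role_from_groups(groups: list) -> str:
--     """
--     Map Authentik groups to Sonicus roles
--     """
--     group_role_mapping = {
--         "sonicus-super-admin": "super_admin",
--         "sonicus-business-admin": "business_admin",
--         "sonicus-staff": "staff",
--         "sonicus-user": "user"
--     }
--
--     # Check groups in order of priority (highest to lowest)
--     for group in ["sonicus-super-admin", "sonicus-business-admin", "sonicus-staff", "sonicus-user"]:
--         if group in groups:
--             return group_role_mapping[group]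
--
--     return "user"  # Default role
-- ===== SOURCE B (Python) =====
-- def determine_role_from_groups(groups: list) -> str:
--     """
--     Map Authentik groups to Sonicus roles
--     """
--     priority = {
--         "sonicus-super-admin": (0, "super_admin"),
--         "sonicus-business-admin": (1, "business_admin"),
--         "sonicus-staff": (2, "staff"),
--         "sonicus-user": (3, "user"),
--     }
--     best = None
--     for g in groups:
--         entry = priority.get(g)
--         if entry is not None and (best is None or entry[0] < best[0]):
--             best = entry
--     return best[1] if best is not None else "user"
-- ===== Notes on version B (the rewrite author's own statement) =====
-- stated objective: alternative
-- what changed: Replaces A's four ordered membership scans of the input with a single pass that looks each group up in a priority dict and keeps the best (lowest-priority-index) match, defaulting to 'user'.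
import Mathlib
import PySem

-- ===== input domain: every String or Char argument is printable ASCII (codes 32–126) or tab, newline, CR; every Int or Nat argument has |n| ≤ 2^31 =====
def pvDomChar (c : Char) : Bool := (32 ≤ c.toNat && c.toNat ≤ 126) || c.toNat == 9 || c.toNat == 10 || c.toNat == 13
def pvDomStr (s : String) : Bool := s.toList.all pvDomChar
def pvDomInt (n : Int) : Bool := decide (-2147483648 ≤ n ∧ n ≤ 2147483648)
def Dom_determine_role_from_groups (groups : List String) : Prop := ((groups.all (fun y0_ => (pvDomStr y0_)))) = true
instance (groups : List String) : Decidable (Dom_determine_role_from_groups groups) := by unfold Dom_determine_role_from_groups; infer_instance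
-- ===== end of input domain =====

-- B replaces A's four ordered membership scans with one pass over `groups` keeping the
-- best (lowest-priority-index) match from a priority dict (objective: alternative).

-- ===== PORT A =====
def roleMapA : PySem.Dict String String :=
  PySem.Dict.ofList [("sonicus-super-admin", "super_admin"),
                     ("sonicus-business-admin", "business_admin"),
                     ("sonicus-staff", "staff"),
                     ("sonicus-user", "user")]

-- the 'for group in [...]: if group in groups: return mapping[group]' loop (early return = Option)
def aLoop (groups : List String) : List String → Option String
  | [] => none
  | g :: rest =>
      if groups.contains g then roleMapA.get? g else aLoop groups rest

def determine_role_from_groups (groups : List String) : String :=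
  match aLoop groups ["sonicus-super-admin", "sonicus-business-admin",
                      "sonicus-staff", "sonicus-user"] with
  | some r => r
  | none => "user"

-- ===== PORT B =====
def prioB : PySem.Dict String (Int × String) :=
  PySem.Dict.ofList [("sonicus-super-admin", (0, "super_admin")),
                     ("sonicus-business-admin", (1, "business_admin")),
                     ("sonicus-staff", (2, "staff")),
                     ("sonicus-user", (3, "user"))]

def determine_role_from_groups_alt (groups : List String) : String :=
  let best := groups.foldl (fun best g =>
    match prioB.get? g with
    | some e =>
        match best with
        | none => some e
        | some b => if e.1 < b.1 then some e else some b
    | none => best) (none : Option (Int × String))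
  match best with
  | some b => b.2
  | none => "user"

-- ===== PRECONDITION & SPEC =====
def Spec_determine_role_from_groups (groups : List String) (out : String) : Prop := out = determine_role_from_groups_alt groups
instance (groups : List String) (out : String) : Decidable (Spec_determine_role_from_groups groups out) := by unfold Spec_determine_role_from_groups; infer_instance

-- ===== CLAIM (what is proved, stated in full; the proofs are below) =====
def Claim_equal_determine_role_from_groups : Prop := ∀ (groups : List String), Dom_determine_role_from_groups groups → Spec_determine_role_from_groups groups (determine_role_from_groups groups)

-- ===== LEMMAS AND PROOFS =====

-- priority index of a group name (4 = unknown)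
def prioN (g : String) : Nat :=
  if g = "sonicus-super-admin" then 0
  else if g = "sonicus-business-admin" then 1
  else if g = "sonicus-staff" then 2
  else if g = "sonicus-user" then 3
  else 4

-- minimal priority present in the list
def mm : List String → Nat
  | [] => 4
  | g :: gs => min (prioN g) (mm gs)

def roleOfN (n : Nat) : String :=
  if n = 0 then "super_admin"
  else if n = 1 then "business_admin"
  else if n = 2 then "staff"
  else "user"

def encN (n : Nat) : Option (Int × String) :=
  if n = 0 then some (0, "super_admin")
  else if n = 1 then some (1, "business_admin")
  else if n = 2 then some (2, "staff")
  else if n = 3 then some (3, "user")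
  else none

lemma mm_le4 (gs : List String) : mm gs ≤ 4 := by
  induction gs with
  | nil => simp [mm]
  | cons g gs ih => simp [mm]; omega

lemma mm_spec (gs : List String) :
    mm gs = (if "sonicus-super-admin" ∈ gs then 0
             else if "sonicus-business-admin" ∈ gs then 1
             else if "sonicus-staff" ∈ gs then 2
             else if "sonicus-user" ∈ gs then 3 else 4) := by
  induction gs with
  | nil => simp [mm]
  | cons g gs ih =>
      simp only [mm, ih, List.mem_cons, prioN]
      by_cases h0 : g = "sonicus-super-admin" <;>
      by_cases h1 : g = "sonicus-business-admin" <;>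
      by_cases h2 : g = "sonicus-staff" <;>
      by_cases h3 : g = "sonicus-user" <;>
      by_cases m0 : "sonicus-super-admin" ∈ gs <;>
      by_cases m1 : "sonicus-business-admin" ∈ gs <;>
      by_cases m2 : "sonicus-staff" ∈ gs <;>
      by_cases m3 : "sonicus-user" ∈ gs <;>
      simp [h0, h1, h2, h3, m0, m1, m2, m3, eq_comm]

lemma A_eq (groups : List String) :
    determine_role_from_groups groups = roleOfN (mm groups) := by
  rw [mm_spec]
  simp only [determine_role_from_groups, aLoop, List.contains_iff_mem]
  by_cases h0 : "sonicus-super-admin" ∈ groups <;>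
  by_cases h1 : "sonicus-business-admin" ∈ groups <;>
  by_cases h2 : "sonicus-staff" ∈ groups <;>
  by_cases h3 : "sonicus-user" ∈ groups <;>
  simp only [h0, h1, h2, h3, if_true, if_false] <;> decide

def fB (best : Option (Int × String)) (g : String) : Option (Int × String) :=
  match prioB.get? g with
  | some e =>
      match best with
      | none => some e
      | some b => if e.1 < b.1 then some e else some b
  | none => best

lemma prioB_items : prioB.items =
    [("sonicus-super-admin", ((0:Int), "super_admin")),
     ("sonicus-business-admin", ((1:Int), "business_admin")),
     ("sonicus-staff", ((2:Int), "staff")),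
     ("sonicus-user", ((3:Int), "user"))] := by decide

lemma fB_enc (k : Nat) (hk : k ≤ 4) (g : String) :
    fB (encN k) g = encN (min k (prioN g)) := by
  by_cases h0 : g = "sonicus-super-admin" <;>
  by_cases h1 : g = "sonicus-business-admin" <;>
  by_cases h2 : g = "sonicus-staff" <;>
  by_cases h3 : g = "sonicus-user" <;>
  subst_vars <;>
  interval_cases k <;>
  simp only [fB, prioN, encN, if_true] <;>
  first
  | decide
  | (have h0' : ("sonicus-super-admin" == g) = false := by rw [beq_eq_false_iff_ne]; exact fun h => h0 h.symm
     have h1' : ("sonicus-business-admin" == g) = false := by rw [beq_eq_false_iff_ne]; exact fun h => h1 h.symm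
     have h2' : ("sonicus-staff" == g) = false := by rw [beq_eq_false_iff_ne]; exact fun h => h2 h.symm
     have h3' : ("sonicus-user" == g) = false := by rw [beq_eq_false_iff_ne]; exact fun h => h3 h.symm
     simp [PySem.Dict.get?, prioB_items, List.find?, h0', h1', h2', h3', h0, h1, h2, h3])

lemma B_inv (gs : List String) : ∀ (k : Nat), k ≤ 4 →
    gs.foldl fB (encN k) = encN (min k (mm gs)) := by
  induction gs with
  | nil => intro k hk; simp [mm, Nat.min_eq_left hk]
  | cons g gs ih =>
      intro k hk
      have h1 : min k (prioN g) ≤ 4 := by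
        have := hk; omega
      calc (g :: gs).foldl fB (encN k)
          = gs.foldl fB (fB (encN k) g) := rfl
        _ = gs.foldl fB (encN (min k (prioN g))) := by rw [fB_enc k hk]
        _ = encN (min (min k (prioN g)) (mm gs)) := ih _ h1
        _ = encN (min k (mm (g :: gs))) := by rw [mm, Nat.min_assoc]

lemma B_eq (groups : List String) :
    determine_role_from_groups_alt groups = roleOfN (mm groups) := by
  have hfold : groups.foldl fB none = encN (mm groups) := by
    have := B_inv groups 4 (le_refl 4)
    simpa [encN, Nat.min_eq_right (mm_le4 groups)] using this
  show (match groups.foldl fB none with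
        | some b => b.2
        | none => "user") = roleOfN (mm groups)
  rw [hfold]
  have h4 := mm_le4 groups
  interval_cases h : (mm groups) <;> simp [encN, roleOfN]

-- ===== VERDICT (by name: the statement is the Claim_ definition above) =====
theorem determine_role_from_groups_spec : Claim_equal_determine_role_from_groups := by
  intro groups _
  show determine_role_from_groups groups = determine_role_from_groups_alt groups
  rw [A_eq, B_eq]
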